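-- pv_equiv track=rewrite | github.com/jinyoung-lim/comp211-f17 | programming2/Python/MazeGraph.py | collectOpenSquares
-- ===== SOURCE A (Python) =====
-- def collectOpenSquares(maze):
--     """Given a list of strings representing a maze, this puts together a
--     list of all the open squares, marked by either space, S, or G. The list
--     contains the (row, col) coordinate of each open square. It also stores and returns
--     the (x, y) position of the starting and goal points, as well."""
--     openList = []
--     startPos = None
--     goalPos = None
--     for row in range(len(maze)):
--         rowStr = maze[row]
--         for col in range(len(rowStr)):
--             sqVal = rowStr[col]
--             if sqVal.upper() in ' SG':
--                 openList.append( (row, col) )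
--             if sqVal.upper() == 'S':
--                 startPos = (row, col)
--             elif sqVal.upper() == 'G':
--                 goalPos = (row, col)
--     return openList, startPos, goalPos
-- ===== SOURCE B (Python) =====
-- def collectOpenSquares(maze):
--     cells = [(ch.upper(), (row, col))
--              for row, rowStr in enumerate(maze)
--              for col, ch in enumerate(rowStr)]
--     openList = [pos for mark, pos in cells if mark in ' SG']
--     marker = dict(cells)
--     return openList, marker.get('S'), marker.get('G')
-- ===== Notes on version B (the rewrite author's own statement) =====
-- stated objective: alternative
-- what changed: Replaced A's single stateful pass by three passes over a flat cell list built once: a comprehension for the open squares and a dict keyed by the uppercased character (last occurrence wins by dict semantics) looked up for 'S' and 'G'.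
import Mathlib
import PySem

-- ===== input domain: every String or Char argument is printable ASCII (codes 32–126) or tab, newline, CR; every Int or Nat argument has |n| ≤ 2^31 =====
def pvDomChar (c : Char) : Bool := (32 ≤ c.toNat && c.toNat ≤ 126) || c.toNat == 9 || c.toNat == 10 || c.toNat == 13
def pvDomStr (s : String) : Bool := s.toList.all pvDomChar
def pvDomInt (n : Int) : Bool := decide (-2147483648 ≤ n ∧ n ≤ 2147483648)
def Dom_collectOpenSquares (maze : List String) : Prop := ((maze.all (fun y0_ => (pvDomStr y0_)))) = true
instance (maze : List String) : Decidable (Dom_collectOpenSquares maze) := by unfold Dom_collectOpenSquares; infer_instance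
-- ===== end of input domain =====

-- B replaces A's single stateful pass by three passes over a flat cell list built once:
-- a comprehension for the open squares, and a dict keyed by the uppercased character
-- looked up at 'S' and 'G'.

-- ===== PORT A =====
-- one step of A's inner loop body, on state (openList, startPos, goalPos)
def cosStep (row : Int) (st : (List (Int × Int)) × (Option (Int × Int)) × (Option (Int × Int)))
    (q : Int × Char) : (List (Int × Int)) × (Option (Int × Int)) × (Option (Int × Int)) :=
  let u := PySem.Chars.upperChar q.2
  -- `sqVal.upper() in ' SG'`: substring test of the 1-char string in " SG"
  let st1 := if PySem.Chars.isIn [u] [' ', 'S', 'G'] then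
      (st.1 ++ [(row, q.1)], st.2.1, st.2.2) else st
  if u = 'S' then (st1.1, some (row, q.1), st1.2.2)
  else if u = 'G' then (st1.1, st1.2.1, some (row, q.1))
  else st1

def collectOpenSquares (maze : List String) : (List (Int × Int)) × (Option (Int × Int)) × (Option (Int × Int)) :=
  (PySem.List.enumerate maze).foldl
    (fun st rp => (PySem.List.enumerate rp.2.toList).foldl (cosStep rp.1) st)
    ([], none, none)

-- ===== PORT B =====
-- cells = [(ch.upper(), (row, col)) for ...]
def cosCells (maze : List String) : List (Char × (Int × Int)) :=
  (PySem.List.enumerate maze).flatMap (fun rp =>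
    (PySem.List.enumerate rp.2.toList).map (fun q => (PySem.Chars.upperChar q.2, (rp.1, q.1))))

def collectOpenSquares_alt (maze : List String) : (List (Int × Int)) × (Option (Int × Int)) × (Option (Int × Int)) :=
  let cells := cosCells maze
  let openList := cells.filterMap (fun vc =>
    if PySem.Chars.isIn [vc.1] [' ', 'S', 'G'] then some vc.2 else none)
  let marker := PySem.Dict.ofList cells
  (openList, marker.get? 'S', marker.get? 'G')

-- ===== PRECONDITION & SPEC =====
def Spec_collectOpenSquares (maze : List String) (out : (List (Int × Int)) × (Option (Int × Int)) × (Option (Int × Int))) : Prop := out = collectOpenSquares_alt maze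
instance (maze : List String) (out : (List (Int × Int)) × (Option (Int × Int)) × (Option (Int × Int))) : Decidable (Spec_collectOpenSquares maze out) := by unfold Spec_collectOpenSquares; infer_instance

-- ===== CLAIM (what is proved, stated in full; the proofs are below) =====
def Claim_equal_collectOpenSquares : Prop := ∀ (maze : List String), Dom_collectOpenSquares maze → Spec_collectOpenSquares maze (collectOpenSquares maze)

-- ===== LEMMAS AND PROOFS =====

-- `'c' in " SG"` for a single character is membership of the character
theorem cos_isIn_singleton (c : Char) (l : List Char) :
    PySem.Chars.isIn [c] l = decide (c ∈ l) := by
  rcases h : PySem.Chars.isIn [c] l with _ | _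
  · rw [PySem.Chars.isIn_eq_false_iff] at h
    simp only [List.infix_iff_prefix_suffix] at h
    push Not at h
    symm; simp only [decide_eq_false_iff_not]
    intro hc
    obtain ⟨pre, suf, hps⟩ := List.append_of_mem hc
    exact (h (c :: suf) (by exact ⟨suf, rfl⟩)) ⟨pre, by rw [hps]⟩
  · rw [PySem.Chars.isIn_iff_infix] at h
    symm; simp only [decide_eq_true_eq]
    exact h.mem (by simp)

-- the last binding for key t in a (key, value) list, as a reverse scan
def cosLast (t : Char) (cs : List (Char × (Int × Int))) : Option (Int × Int) :=
  cs.reverse.findSome? (fun vc => if vc.1 = t then some vc.2 else none)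

-- B's dict lookup is the last binding in the cell list
theorem cos_get?_update (d : PySem.Dict Char (Int × Int)) (cs : List (Char × (Int × Int))) (t : Char) :
    (d.update cs).get? t = (cosLast t cs).or (d.get? t) := by
  induction cs generalizing d with
  | nil => simp [cosLast, PySem.Dict.update]
  | cons p cs ih =>
    show ((d.insert p.1 p.2).update cs).get? t = _
    rw [ih]
    simp only [cosLast, List.reverse_cons, List.findSome?_append, Option.or_assoc]
    by_cases h : p.1 = t
    · simp [h]
    · have h' : ¬ t = p.1 := fun hh => h hh.symm
      simp [h, h', PySem.Dict.get?_insert]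

theorem cos_get?_ofList (cs : List (Char × (Int × Int))) (t : Char) :
    (PySem.Dict.ofList cs).get? t = cosLast t cs := by
  rw [PySem.Dict.ofList, cos_get?_update]
  simp [PySem.Dict.get?_empty]

-- per-row pieces of A's loop, phrased on the enumerated row
def cosRowFind (r : Int) (t : Char) (qs : List (Int × Char)) : Option (Int × Int) :=
  qs.reverse.findSome? (fun q =>
    if PySem.Chars.upperChar q.2 = t then some (r, q.1) else none)

def cosRowOpen (r : Int) (qs : List (Int × Char)) : List (Int × Int) :=
  qs.filterMap (fun q =>
    if PySem.Chars.upperChar q.2 ∈ [' ', 'S', 'G'] then some (r, q.1) else none)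

theorem cosRowFind_cons (r : Int) (t : Char) (qs : List (Int × Char)) (q : Int × Char) :
    cosRowFind r t (q :: qs)
      = (cosRowFind r t qs).or (if PySem.Chars.upperChar q.2 = t then some (r, q.1) else none) := by
  simp [cosRowFind, List.findSome?_append]

-- A's inner loop over one row = the per-row pieces, threaded through the incoming state
theorem cos_inner (r : Int) (qs : List (Int × Char))
    (st : (List (Int × Int)) × (Option (Int × Int)) × (Option (Int × Int))) :
    qs.foldl (cosStep r) st
      = (st.1 ++ cosRowOpen r qs,
         (cosRowFind r 'S' qs).or st.2.1,
         (cosRowFind r 'G' qs).or st.2.2) := by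
  induction qs generalizing st with
  | nil => simp [cosRowOpen, cosRowFind]
  | cons q qs ih =>
    rw [List.foldl_cons, ih, cosRowFind_cons, cosRowFind_cons]
    simp only [cosStep, cos_isIn_singleton, cosRowOpen, List.filterMap_cons]
    by_cases hS : PySem.Chars.upperChar q.2 = 'S' <;>
      by_cases hG : PySem.Chars.upperChar q.2 = 'G' <;>
      by_cases hM : PySem.Chars.upperChar q.2 ∈ [' ', 'S', 'G'] <;>
      simp_all

-- A's whole fold over (row, string) pairs, threaded through the state
theorem cos_outer (ps : List (Int × String))
    (st : (List (Int × Int)) × (Option (Int × Int)) × (Option (Int × Int))) :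
    ps.foldl (fun st rp => (PySem.List.enumerate rp.2.toList).foldl (cosStep rp.1) st) st
      = (st.1 ++ ps.flatMap (fun rp => cosRowOpen rp.1 (PySem.List.enumerate rp.2.toList)),
         (ps.reverse.findSome? (fun rp => cosRowFind rp.1 'S' (PySem.List.enumerate rp.2.toList))).or st.2.1,
         (ps.reverse.findSome? (fun rp => cosRowFind rp.1 'G' (PySem.List.enumerate rp.2.toList))).or st.2.2) := by
  induction ps generalizing st with
  | nil => simp
  | cons p ps ih =>
    rw [List.foldl_cons, cos_inner, ih]
    simp [List.findSome?_append, Option.or_assoc]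

-- the last binding in the flat cell list is the nested reverse scan
theorem cos_last_cells (ps : List (Int × String)) (t : Char) :
    cosLast t (ps.flatMap (fun rp =>
        (PySem.List.enumerate rp.2.toList).map (fun q => (PySem.Chars.upperChar q.2, (rp.1, q.1)))))
      = ps.reverse.findSome? (fun rp => cosRowFind rp.1 t (PySem.List.enumerate rp.2.toList)) := by
  induction ps with
  | nil => simp [cosLast]
  | cons p ps ih =>
    simp only [List.flatMap_cons, List.reverse_cons, cosLast, List.reverse_append,
      List.findSome?_append] at *
    rw [ih]
    congr 1
    simp [cosRowFind, ← List.map_reverse, List.findSome?_map, Function.comp_def]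

-- ===== VERDICT (by name: the statement is the Claim_ definition above) =====
theorem collectOpenSquares_spec : Claim_equal_collectOpenSquares := by
  intro maze _
  show collectOpenSquares maze = collectOpenSquares_alt maze
  rw [collectOpenSquares, cos_outer]
  simp only [collectOpenSquares_alt, cosCells, cos_get?_ofList, cos_last_cells,
    List.filterMap_flatMap, List.filterMap_map, List.nil_append, Option.or_none]
  congr 1
  refine List.flatMap_congr (fun rp _ => ?_)
  simp [cosRowOpen, cos_isIn_singleton]
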